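-- pv_equiv track=rewrite | github.com/mouredev/retos-programacion-2023 | Retos/Reto #15 - AUREBESH [Fácil]/python/sublian.py | es_2_aurebesh
-- ===== SOURCE A (Python) =====
-- es_dict = {
--     "A": "Aurek",
--     "B": "Besh",
--     "C": "Cresh",
--     "D": "Dorn",
--     "E": "Esk",
--     "F": "Forn",
--     "G": "Greer",
--     "H": "Herf",
--     "I": "Isk",
--     "J": "Jenth",
--     "K": "Krill",
--     "L": "Leth",
--     "M": "Mern",
--     "N": "Nern",
--     "O": "Osk",
--     "P": "Peth",
--     "Q": "Qek",
--     "R": "Resh",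
--     "S": "Senth",
--     "T": "Trill",
--     "U": "Usk",
--     "V": "Vev",
--     "W": "Wesk",
--     "X": "Xesh",
--     "Y": "Yirt",
--     "Z": "Zerek",
--     "OO": "Orenth",
--     "SH": "Shen",
--     "TH": "Thesh",
--     "AE": "Enth",
--     "EO": "Onith",
--     "NG": "Nen",
-- }
--
-- def es_2_aurebesh(text):
--     resultado = ""
--     i = 0
--     text = text.upper()
--     while i <= len(text) - 1:
--         #valida que sea un par de letras presentes en el diccionario
--         if i + 1 < len(text) and f"{text[i]}{text[i+1]}" in es_dict:
--             resultado += f"{es_dict.get(f'{text[i]}{text[i+1]}')} "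
--             i += 1
--         #caso para una letra presente en el diccionario
--         else:
--             resultado += f"{es_dict.get(text[i], text[i])} "
--         i += 1
--     return resultado
-- ===== SOURCE B (Python) =====
-- es_dict = {
--     "A": "Aurek",
--     "B": "Besh",
--     "C": "Cresh",
--     "D": "Dorn",
--     "E": "Esk",
--     "F": "Forn",
--     "G": "Greer",
--     "H": "Herf",
--     "I": "Isk",
--     "J": "Jenth",
--     "K": "Krill",
--     "L": "Leth",
--     "M": "Mern",
--     "N": "Nern",
--     "O": "Osk",
--     "P": "Peth",
--     "Q": "Qek",
--     "R": "Resh",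
--     "S": "Senth",
--     "T": "Trill",
--     "U": "Usk",
--     "V": "Vev",
--     "W": "Wesk",
--     "X": "Xesh",
--     "Y": "Yirt",
--     "Z": "Zerek",
--     "OO": "Orenth",
--     "SH": "Shen",
--     "TH": "Thesh",
--     "AE": "Enth",
--     "EO": "Onith",
--     "NG": "Nen",
-- }
--
--
--
-- def es_2_aurebesh(text):
--     # One pass over the characters with a pending previous character:
--     # emit the digraph when (pending, current) is a dictionary key, else flush pending.
--     out = []
--     prev = None
--     for c in text.upper():
--         if prev is not None and prev + c in es_dict:
--             out.append(es_dict[prev + c] + " ")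
--             prev = None
--         else:
--             if prev is not None:
--                 out.append(es_dict.get(prev, prev) + " ")
--             prev = c
--     if prev is not None:
--         out.append(es_dict.get(prev, prev) + " ")
--     return "".join(out)
-- ===== Notes on version B (the rewrite author's own statement) =====
-- stated objective: faster
-- what changed: A scans with an index and an explicit one-character look-ahead, building the result by repeated string concatenation; B makes a single fold over the characters carrying a pending previous character (emitting the digraph translation when pending+current is a dictionary key, otherwise flushing the pending character), collects the pieces in a list and joins them once at the end.
import Mathlib
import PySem

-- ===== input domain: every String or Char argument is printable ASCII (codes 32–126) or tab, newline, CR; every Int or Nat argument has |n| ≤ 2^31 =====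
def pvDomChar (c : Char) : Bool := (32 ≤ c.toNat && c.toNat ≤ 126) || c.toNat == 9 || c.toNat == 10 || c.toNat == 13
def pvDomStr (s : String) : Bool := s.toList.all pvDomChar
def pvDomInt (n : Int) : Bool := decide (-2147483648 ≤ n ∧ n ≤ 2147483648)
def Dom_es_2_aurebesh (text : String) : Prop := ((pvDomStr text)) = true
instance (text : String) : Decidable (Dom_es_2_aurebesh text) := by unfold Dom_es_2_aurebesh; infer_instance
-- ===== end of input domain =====

-- B replaces A's index loop with look-ahead (repeated string concatenation) by a one-pass
-- fold carrying a pending previous character that collects the pieces and joins them once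
-- (objective: faster; a timing run measured B faster at the largest sizes).


-- ===== PORT A =====
-- the module-level dict literal es_dict (shared context of both versions)
def esDict : PySem.Dict String String := PySem.Dict.mk [
  ("A", "Aurek"), ("B", "Besh"), ("C", "Cresh"), ("D", "Dorn"), ("E", "Esk"),
  ("F", "Forn"), ("G", "Greer"), ("H", "Herf"), ("I", "Isk"), ("J", "Jenth"),
  ("K", "Krill"), ("L", "Leth"), ("M", "Mern"), ("N", "Nern"), ("O", "Osk"),
  ("P", "Peth"), ("Q", "Qek"), ("R", "Resh"), ("S", "Senth"), ("T", "Trill"),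
  ("U", "Usk"), ("V", "Vev"), ("W", "Wesk"), ("X", "Xesh"), ("Y", "Yirt"),
  ("Z", "Zerek"), ("OO", "Orenth"), ("SH", "Shen"), ("TH", "Thesh"),
  ("AE", "Enth"), ("EO", "Onith"), ("NG", "Nen")]

-- A's while loop over index i; the nested dite transliterates the short-circuit
-- `i + 1 < len(text) and pair in es_dict` (text[i+1] is only read under the guard).
-- `es_dict.get(pair)` in the taken branch is guarded by `pair in es_dict`, so the
-- f-string's None case is unreachable; "None" is its literal rendering.
def esALoop (cs : List Char) (i : Nat) (res : String) : String :=
  if h : i < cs.length then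
    if h2 : i + 1 < cs.length then
      if esDict.contains (String.ofList [cs[i], cs[i+1]]) then
        esALoop cs (i + 2)
          (res ++ (esDict.get? (String.ofList [cs[i], cs[i+1]])).getD "None" ++ " ")
      else
        esALoop cs (i + 1)
          (res ++ esDict.getD (String.ofList [cs[i]]) (String.ofList [cs[i]]) ++ " ")
    else
      esALoop cs (i + 1)
        (res ++ esDict.getD (String.ofList [cs[i]]) (String.ofList [cs[i]]) ++ " ")
  else res
termination_by cs.length - i

def es_2_aurebesh (text : String) : String :=
  esALoop (PySem.Str.upper text).toList 0 ""

-- ===== PORT B =====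
-- one fold step of B: (out, prev) updated by the next character c
-- (`es_dict[prev + c]` is guarded by `prev + c in es_dict`, so KeyError is unreachable).
def esBStep (acc : List String × Option Char) (c : Char) : List String × Option Char :=
  match acc with
  | (out, some p) =>
    if esDict.contains (String.ofList [p, c]) then
      (out ++ [(esDict.get? (String.ofList [p, c])).getD "" ++ " "], none)
    else
      (out ++ [esDict.getD (String.ofList [p]) (String.ofList [p]) ++ " "], some c)
  | (out, none) => (out, some c)

def es_2_aurebesh_alt (text : String) : String :=
  let r := (PySem.Str.upper text).toList.foldl esBStep ([], none)
  let out := match r.2 with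
    | some p => r.1 ++ [esDict.getD (String.ofList [p]) (String.ofList [p]) ++ " "]
    | none => r.1
  PySem.Str.join "" out

-- ===== PRECONDITION & SPEC =====
def Spec_es_2_aurebesh (text : String) (out : String) : Prop := out = es_2_aurebesh_alt text
instance (text : String) (out : String) : Decidable (Spec_es_2_aurebesh text out) := by unfold Spec_es_2_aurebesh; infer_instance

-- ===== CLAIM (what is proved, stated in full; the proofs are below) =====
def Claim_equal_es_2_aurebesh : Prop := ∀ (text : String), Dom_es_2_aurebesh text → Spec_es_2_aurebesh text (es_2_aurebesh text)

-- ===== LEMMAS AND PROOFS =====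

-- proof-only helpers: the translated piece for a single character / a digraph
def singTok (c : Char) : String := esDict.getD (String.ofList [c]) (String.ofList [c]) ++ " "
def pairTok (a b : Char) : String := (esDict.get? (String.ofList [a, b])).getD "" ++ " "

-- the token pieces of a character list, greedy digraph first
def tokN : List Char → List String
  | [] => []
  | [c] => [singTok c]
  | a :: b :: r =>
    if esDict.contains (String.ofList [a, b]) then pairTok a b :: tokN r
    else singTok a :: tokN (b :: r)

def finishB (r : List String × Option Char) : List String :=
  match r.2 with
  | some p => r.1 ++ [singTok p]
  | none => r.1

lemma joinStr_nil : PySem.Str.join "" ([] : List String) = "" := rfl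

lemma joinStr_cons (x : String) (xs : List String) :
    PySem.Str.join "" (x :: xs) = x ++ PySem.Str.join "" xs := by
  cases xs <;> simp [PySem.Str.join, PySem.Chars.join_nil, PySem.Chars.join_singleton,
    PySem.Chars.join_cons_cons, String.ofList_append]

lemma foldB_eq (l : List Char) : ∀ (out : List String) (p? : Option Char),
    finishB (l.foldl esBStep (out, p?)) =
      out ++ (match p? with | none => tokN l | some p => tokN (p :: l)) := by
  induction l with
  | nil =>
    intro out p?
    cases p? <;> simp [finishB, tokN]
  | cons c l ih =>
    intro out p?
    cases p? with
    | none =>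
      simpa [esBStep] using ih out (some c)
    | some p =>
      by_cases h : esDict.contains (String.ofList [p, c])
      · simp [List.foldl_cons, esBStep, h, ih, tokN, pairTok]
      · simp [List.foldl_cons, esBStep, h, ih, tokN, singTok]

lemma getD_none_eq_getD_empty (k : String) (h : esDict.contains k = true) :
    (esDict.get? k).getD "None" = (esDict.get? k).getD "" := by
  rw [PySem.Dict.contains_eq_isSome_get?] at h
  cases hg : esDict.get? k with
  | none => rw [hg] at h; simp at h
  | some v => simp

lemma esALoop_eq (cs : List Char) : ∀ (n i : Nat) (res : String),
    cs.length - i ≤ n →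
    esALoop cs i res = res ++ PySem.Str.join "" (tokN (cs.drop i)) := by
  intro n
  induction n with
  | zero =>
    intro i res hle
    have hlen : cs.length ≤ i := by omega
    rw [esALoop]
    simp [List.drop_eq_nil_of_le hlen, Nat.not_lt.mpr hlen, tokN, joinStr_nil, String.append_empty]
  | succ n ih =>
    intro i res hle
    rcases hd : cs.drop i with _ | ⟨a, r⟩
    · have hlen : cs.length ≤ i := by
        by_contra h
        exact absurd hd (by simp [List.drop_eq_nil_iff]; omega)
      rw [esALoop]
      simp [Nat.not_lt.mpr hlen, tokN, joinStr_nil, String.append_empty]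
    · have hi : i < cs.length := by
        by_contra h
        simp [List.drop_eq_nil_of_le (Nat.le_of_not_lt h)] at hd
      have ha : cs[i] = a := by
        have hh : (cs.drop i).head? = some a := by rw [hd]; rfl
        have h2 := List.head?_drop (l := cs) (i := i)
        rw [hh] at h2
        simpa [List.getElem?_eq_getElem hi] using h2.symm
      have hr : cs.drop (i + 1) = r := by
        have : List.drop 1 (cs.drop i) = r := by simp [hd]
        simpa [List.drop_drop, Nat.add_comm] using this
      rcases hrr : r with _ | ⟨b, r2⟩ <;> rw [esALoop]
      · -- last character
        have hlen : cs.length = i + 1 := by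
          have := congrArg List.length hd
          simp [hrr] at this; omega
        simp only [hi, dif_pos, show ¬ (i + 1 < cs.length) by omega, dif_neg, not_false_iff]
        rw [ih (i + 1) _ (by omega)]
        simp [hr, hrr, ha, tokN, singTok, joinStr_cons, joinStr_nil,
          String.append_assoc, String.append_empty]
      · -- at least two characters remain
        have h2 : i + 1 < cs.length := by
          by_contra h
          have : cs.drop (i + 1) = [] := List.drop_eq_nil_of_le (Nat.le_of_not_lt h)
          rw [hr, hrr] at this
          simp at this
        have hb : cs[i+1] = b := by
          have hh : (cs.drop (i+1)).head? = some b := by rw [hr, hrr]; rfl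
          have hhd := List.head?_drop (l := cs) (i := i + 1)
          rw [hh] at hhd
          simpa [List.getElem?_eq_getElem h2] using hhd.symm
        simp only [hi, dif_pos, h2, dif_pos, ha, hb]
        by_cases hc : esDict.contains (String.ofList [a, b])
        · have hr2 : cs.drop (i + 2) = r2 := by
            have hh : List.drop (i + 1 + 1) cs = r2 := by
              rw [← List.drop_drop]; simp [hr, hrr]
            exact hh
          rw [if_pos hc, ih (i + 2) _ (by omega)]
          rw [getD_none_eq_getD_empty _ hc]
          simp [hr2, tokN, hc, pairTok, joinStr_cons, String.append_assoc]
        · rw [if_neg hc, ih (i + 1) _ (by omega)]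
          simp [hr, hrr, tokN, hc, singTok, joinStr_cons, String.append_assoc]

-- ===== VERDICT (by name: the statement is the Claim_ definition above) =====
theorem es_2_aurebesh_spec : Claim_equal_es_2_aurebesh := by
  intro text _
  unfold Spec_es_2_aurebesh es_2_aurebesh es_2_aurebesh_alt
  rw [esALoop_eq _ ((PySem.Str.upper text).toList.length) 0 "" (by omega),
    List.drop_zero, String.empty_append]
  have h := foldB_eq ((PySem.Str.upper text).toList) [] none
  simp only [finishB, singTok, List.nil_append] at h
  exact (congrArg (PySem.Str.join "") h).symm
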